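-- pv_equiv track=rewrite | github.com/prashansaaa29/100-days-of-code | Difficulty: Easy/Kth distance/kth-distance.py | checkDuplicatesWithinK
-- ===== SOURCE A (Python) =====
-- def checkDuplicatesWithinK(arr, k):
--     mp = {}
--     for i, v in enumerate(arr):
--         if v in mp:
--             if i - mp[v] <= k:
--                 return True
--         mp[v] = i
--     return False
-- ===== SOURCE B (Python) =====
-- def checkDuplicatesWithinK(arr, k):
--     if k <= 0:
--         return False
--     window = set()
--     for i, v in enumerate(arr):
--         if v in window:
--             return True
--         window.add(v)
--         if len(window) > k:
--             window.remove(arr[i - k])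
--     return False
-- ===== Notes on version B (the rewrite author's own statement) =====
-- stated objective: alternative
-- what changed: Replaces A's dict mapping each value to its last-seen index (with a lazy distance check on hit) by a sliding-window set holding the values of the last k positions, evicting arr[i-k] each step, with an early False for k <= 0.
import Mathlib
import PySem

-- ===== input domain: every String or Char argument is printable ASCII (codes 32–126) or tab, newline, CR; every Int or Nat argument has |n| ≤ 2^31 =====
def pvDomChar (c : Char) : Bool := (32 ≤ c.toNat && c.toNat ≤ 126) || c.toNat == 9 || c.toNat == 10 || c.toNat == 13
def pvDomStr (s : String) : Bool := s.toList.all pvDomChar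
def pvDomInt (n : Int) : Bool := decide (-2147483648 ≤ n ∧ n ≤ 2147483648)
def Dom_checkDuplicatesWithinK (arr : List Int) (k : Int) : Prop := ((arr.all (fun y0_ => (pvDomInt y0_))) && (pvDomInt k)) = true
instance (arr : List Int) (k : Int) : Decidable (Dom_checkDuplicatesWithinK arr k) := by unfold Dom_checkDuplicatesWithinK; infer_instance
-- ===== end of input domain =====

-- B replaces A's dict of last-seen indices by a sliding-window set of the values at the
-- last k positions (with an early False for k ≤ 0); same return value on every input.

-- ===== PORT A =====
-- A's loop: mp maps each value to its last index; 'return True' is the Bool result.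
def auxA (k : Int) : List Int → Nat → PySem.Dict Int Int → Bool
  | [], _, _ => false
  | v :: rest, i, mp =>
    match mp.get? v with
    | some j => if (i : Int) - j ≤ k then true
                else auxA k rest (i + 1) (mp.insert v (i : Int))
    | none => auxA k rest (i + 1) (mp.insert v (i : Int))

def checkDuplicatesWithinK (arr : List Int) (k : Int) : Bool :=
  auxA k arr 0 PySem.Dict.empty

-- ===== PORT B =====
-- B's loop: w is the set of the values at the last (at most) k positions; arr[i-k] is read
-- with pyGet? (in range whenever that branch is taken, so the getD defaults are never used).
def auxB (arr : List Int) (k : Int) : List Int → Nat → PySem.Set Int → Bool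
  | [], _, _ => false
  | v :: rest, i, w =>
    if PySem.Set.contains w v then true
    else
      let w' := PySem.Set.add w v
      if PySem.Set.len w' > k then
        auxB arr k rest (i + 1)
          ((PySem.Set.remove? w' ((PySem.List.pyGet? arr ((i : Int) - k)).getD 0)).getD w')
      else auxB arr k rest (i + 1) w'

def checkDuplicatesWithinK_alt (arr : List Int) (k : Int) : Bool :=
  if k ≤ 0 then false
  else auxB arr k arr 0 PySem.Set.empty

-- ===== PRECONDITION & SPEC =====
def Spec_checkDuplicatesWithinK (arr : List Int) (k : Int) (out : Bool) : Prop := out = checkDuplicatesWithinK_alt arr k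
instance (arr : List Int) (k : Int) (out : Bool) : Decidable (Spec_checkDuplicatesWithinK arr k out) := by unfold Spec_checkDuplicatesWithinK; infer_instance

-- ===== CLAIM (what is proved, stated in full; the proofs are below) =====
def Claim_equal_checkDuplicatesWithinK : Prop := ∀ (arr : List Int) (k : Int), Dom_checkDuplicatesWithinK arr k → Spec_checkDuplicatesWithinK arr k (checkDuplicatesWithinK arr k)

-- ===== LEMMAS AND PROOFS =====

def lastIdx : List Int → Int → Option Nat
  | [], _ => none
  | x :: t, v =>
    match lastIdx t v with
    | some j => some (j + 1)
    | none => if x = v then some 0 else none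

theorem lastIdx_lt {h : List Int} {v : Int} {j : Nat} (hj : lastIdx h v = some j) :
    j < h.length := by
  induction h generalizing j with
  | nil => simp [lastIdx] at hj
  | cons x t ih =>
    simp only [lastIdx] at hj
    cases hlt : lastIdx t v with
    | some j' =>
      rw [hlt] at hj; simp at hj
      have := ih hlt; simp; omega
    | none =>
      rw [hlt] at hj
      by_cases hx : x = v
      · simp [hx] at hj; simp [← hj]
      · simp [hx] at hj

theorem mem_drop_iff_lastIdx (h : List Int) (v : Int) (d : Nat) :
    v ∈ h.drop d ↔ ∃ j, lastIdx h v = some j ∧ d ≤ j := by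
  induction h generalizing d with
  | nil => simp [lastIdx]
  | cons x t ih =>
    cases hlt : lastIdx t v with
    | some j =>
      have hvt : v ∈ t := by
        have := (ih 0).mpr ⟨j, hlt, Nat.zero_le j⟩
        simpa using this
      cases d with
      | zero => simp [lastIdx, hlt, hvt]
      | succ d' =>
        simp only [List.drop_succ_cons, lastIdx, hlt, ih d']
        constructor
        · rintro ⟨j', hj', hd⟩
          simp at hj'
          exact ⟨j + 1, rfl, by omega⟩
        · rintro ⟨j', hj', hd⟩
          simp at hj'
          exact ⟨j, rfl, by omega⟩
    | none =>
      have hvt : v ∉ t := by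
        intro hm
        rcases (ih 0).mp (by simpa using hm) with ⟨j, hj, _⟩
        simp [hlt] at hj
      cases d with
      | zero =>
        by_cases hx : x = v
        · simp [lastIdx, hlt, hx, hvt]
        · simp [lastIdx, hlt, hx, hvt]
          exact fun h => hx h.symm
      | succ d' =>
        have hnd : v ∉ t.drop d' := fun hm => hvt (List.mem_of_mem_drop hm)
        by_cases hx : x = v <;>
          simp [lastIdx, hlt, hx, hnd]

theorem lastIdx_append (h : List Int) (v x : Int) :
    lastIdx (h ++ [v]) x = if x = v then some h.length else lastIdx h x := by
  induction h with
  | nil =>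
    by_cases hx : x = v
    · simp [lastIdx, hx]
    · simp [lastIdx, hx]
      exact fun h => hx h.symm
  | cons y t ih =>
    by_cases hx : x = v
    · subst hx
      rw [List.cons_append, lastIdx, ih, if_pos rfl, if_pos rfl]
      simp
    · simp only [List.cons_append, lastIdx, ih, if_neg hx]

theorem filter_ne_of_not_mem {l : List Int} {x : Int} (h : x ∉ l) :
    l.filter (fun y => !(y == x)) = l := by
  apply List.filter_eq_self.mpr
  intro y hy
  simp only [Bool.not_eq_eq_eq_not, Bool.not_true, beq_eq_false_iff_ne, ne_eq]
  rintro rfl; exact h hy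

theorem aux_main (arr : List Int) (k : Int) (hk : 0 < k) :
    ∀ (rest : List Int) (i : Nat) (mp : PySem.Dict Int Int) (w : PySem.Set Int),
      arr.drop i = rest →
      (∀ x, mp.get? x = (lastIdx (arr.take i) x).map Int.ofNat) →
      w = (arr.take i).drop (i - k.toNat) →
      ((arr.take i).drop (i - k.toNat)).Nodup →
      auxA k rest i mp = auxB arr k rest i w := by
  intro rest
  induction rest with
  | nil => intro i mp w _ _ _ _; rfl
  | cons v rest ih =>
    intro i mp w hdrop hmp hw hnd
    subst hw
    have hkK : ((k.toNat : Int)) = k := Int.toNat_of_nonneg (le_of_lt hk)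
    have hi : i < arr.length := by
      by_contra hle
      rw [List.drop_eq_nil_of_le (by omega)] at hdrop
      exact absurd hdrop (by simp)
    have hlen : (arr.take i).length = i := by simp; omega
    have hvq : arr[i]? = some v := by
      have h0 : (arr.drop i)[0]? = arr[i + 0]? := List.getElem?_drop
      rw [hdrop] at h0; simpa using h0.symm
    have hv : arr[i] = v := by
      have h1 := List.getElem?_eq_getElem (l := arr) (i := i) (by omega)
      rw [hvq] at h1; exact (Option.some_inj.mp h1).symm
    have htake : arr.take i ++ [v] = arr.take (i + 1) := by
      rw [List.take_add_one, hvq]; rfl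
    have hdrop' : arr.drop (i + 1) = rest := by
      have h1 : arr.drop (i + 1) = (arr.drop i).tail := by simp [List.tail_drop]
      rw [h1, hdrop]; rfl
    -- the two duplicate tests agree
    have htest : (∃ j, lastIdx (arr.take i) v = some j ∧ (i : Int) - (j : Int) ≤ k)
        ↔ PySem.Set.contains ((arr.take i).drop (i - k.toNat)) v = true := by
      rw [PySem.Set.contains, List.contains_iff_mem, mem_drop_iff_lastIdx]
      constructor
      · rintro ⟨j, hj, hle⟩; exact ⟨j, hj, by omega⟩
      · rintro ⟨j, hj, hle⟩
        have hjlt := lastIdx_lt hj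
        rw [hlen] at hjlt
        exact ⟨j, hj, by omega⟩
    have hmp' : ∀ x, (mp.insert v (i : Int)).get? x
        = (lastIdx (arr.take (i + 1)) x).map Int.ofNat := by
      intro x
      rw [← htake, lastIdx_append]
      by_cases hxv : x = v
      · subst hxv; rw [PySem.Dict.get?_insert_self, if_pos rfl, hlen]; rfl
      · rw [PySem.Dict.get?_insert_of_ne _ _ hxv, if_neg hxv]; exact hmp x
    -- the continuation: both sides recurse and the invariant is maintained
    have hcont : v ∉ (arr.take i).drop (i - k.toNat) →
        auxA k rest (i + 1) (mp.insert v (i : Int)) =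
        (if PySem.Set.len (PySem.Set.add ((arr.take i).drop (i - k.toNat)) v) > k then
          auxB arr k rest (i + 1)
            ((PySem.Set.remove? (PySem.Set.add ((arr.take i).drop (i - k.toNat)) v)
              ((PySem.List.pyGet? arr ((i : Int) - k)).getD 0)).getD
                (PySem.Set.add ((arr.take i).drop (i - k.toNat)) v))
        else auxB arr k rest (i + 1) (PySem.Set.add ((arr.take i).drop (i - k.toNat)) v)) := by
      intro hvw
      have hadd : PySem.Set.add ((arr.take i).drop (i - k.toNat)) v
          = (arr.take i).drop (i - k.toNat) ++ [v] := by
        rw [PySem.Set.add, if_neg]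
        simp [PySem.Set.contains, hvw]
      have hlw : ((arr.take i).drop (i - k.toNat)).length = i - (i - k.toNat) := by
        rw [List.length_drop, hlen]
      by_cases hik : k.toNat ≤ i
      · -- full window: drop the oldest element arr[i - k]
        have hlenK : PySem.Set.len (PySem.Set.add ((arr.take i).drop (i - k.toNat)) v) > k := by
          rw [hadd, PySem.Set.len]
          simp only [List.length_append, List.length_singleton, hlw]
          push_cast; omega
        rw [if_pos hlenK]
        have hidx : (i : Int) - k = ((i - k.toNat : Nat) : Int) := by omega
        have hget : PySem.List.pyGet? arr ((i : Int) - k) = some arr[i - k.toNat] := by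
          rw [hidx, PySem.List.pyGet?_natCast, List.getElem?_eq_getElem (by omega)]
        have hsplit : (arr.take i).drop (i - k.toNat)
            = arr[i - k.toNat] :: (arr.take i).drop (i - k.toNat + 1) := by
          rw [List.drop_eq_getElem_cons (by omega)]
          simp [List.getElem_take]
        have hndtail : ((arr.take i).drop (i - k.toNat + 1)).Nodup ∧
            arr[i - k.toNat] ∉ (arr.take i).drop (i - k.toNat + 1) := by
          rw [hsplit] at hnd
          exact ⟨hnd.of_cons, (List.nodup_cons.mp hnd).1⟩
        have hvne : v ∉ (arr.take i).drop (i - k.toNat + 1) ∧ v ≠ arr[i - k.toNat] := by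
          rw [hsplit] at hvw
          simp only [List.mem_cons, not_or] at hvw
          exact ⟨hvw.2, hvw.1⟩
        have hrem : (PySem.Set.remove? (PySem.Set.add ((arr.take i).drop (i - k.toNat)) v)
              ((PySem.List.pyGet? arr ((i : Int) - k)).getD 0)).getD
                (PySem.Set.add ((arr.take i).drop (i - k.toNat)) v)
            = (arr.take i).drop (i - k.toNat + 1) ++ [v] := by
          rw [hget]
          simp only [Option.getD_some]
          rw [PySem.Set.remove?, if_pos, PySem.Set.discard, hadd, hsplit]
          · rw [List.cons_append, List.filter_cons_of_neg (by simp)]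
            apply filter_ne_of_not_mem
            simp only [List.mem_append, List.mem_singleton, not_or]
            exact ⟨hndtail.2, fun h => hvne.2 h.symm⟩
          · rw [hadd, hsplit]
            simp [PySem.Set.contains]
        rw [hrem]
        apply ih (i + 1) _ _ hdrop' hmp'
        · rw [← htake]
          have hd : i + 1 - k.toNat = (i - k.toNat + 1) := by omega
          rw [hd, List.drop_append_of_le_length (by omega)]
        · have hd : i + 1 - k.toNat = (i - k.toNat + 1) := by omega
          rw [← htake, hd, List.drop_append_of_le_length (by omega)]
          apply List.Nodup.append hndtail.1 (by simp)
          simp only [List.disjoint_singleton]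
          exact hvne.1
      · -- window not yet full: just add v
        have hz : i - k.toNat = 0 := by omega
        have hle : ¬ PySem.Set.len (PySem.Set.add ((arr.take i).drop (i - k.toNat)) v) > k := by
          rw [hadd, PySem.Set.len]
          simp only [List.length_append, List.length_singleton, hlw]
          push_cast; omega
        rw [if_neg hle]
        have hz' : i + 1 - k.toNat = 0 := by omega
        apply ih (i + 1) _ _ hdrop' hmp'
        · rw [hadd, hz, hz', ← htake, List.drop_zero, List.drop_zero]
        · rw [hz', ← htake, List.drop_zero]
          apply List.Nodup.append _ (by simp)
          · simp only [List.disjoint_singleton]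
            rw [hz, List.drop_zero] at hvw
            exact hvw
          · rw [hz, List.drop_zero] at hnd; exact hnd
    simp only [auxA, auxB]
    cases hget : lastIdx (arr.take i) v with
    | some j =>
      rw [hmp v, hget]
      simp only [Option.map_some]
      by_cases hle : (i : Int) - Int.ofNat j ≤ k
      · rw [if_pos hle, if_pos (htest.mp ⟨j, hget, hle⟩)]
      · have hnc : PySem.Set.contains ((arr.take i).drop (i - k.toNat)) v = false := by
          rcases Bool.eq_false_or_eq_true
              (PySem.Set.contains ((arr.take i).drop (i - k.toNat)) v) with h | h
          · rcases htest.mpr h with ⟨j', hj', hle'⟩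
            rw [hget] at hj'; simp at hj'
            rw [show Int.ofNat j = ((j : Nat) : Int) from rfl] at hle
            omega
          · exact h
        rw [if_neg hle, if_neg (by rw [hnc]; simp)]
        exact hcont (by
          simp only [PySem.Set.contains] at hnc
          intro hm
          rw [List.contains_iff_mem.mpr hm] at hnc
          exact Bool.noConfusion hnc)
    | none =>
      rw [hmp v, hget]
      have hnc : PySem.Set.contains ((arr.take i).drop (i - k.toNat)) v = false := by
        rcases Bool.eq_false_or_eq_true
            (PySem.Set.contains ((arr.take i).drop (i - k.toNat)) v) with h | h
        · rcases htest.mpr h with ⟨j', hj', _⟩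
          rw [hget] at hj'; simp at hj'
        · exact h
      simp only [Option.map_none]
      rw [if_neg (by rw [hnc]; simp)]
      exact hcont (by
          simp only [PySem.Set.contains] at hnc
          intro hm
          rw [List.contains_iff_mem.mpr hm] at hnc
          exact Bool.noConfusion hnc)

theorem auxA_nonpos (k : Int) (hk : k ≤ 0) :
    ∀ (rest : List Int) (i : Nat) (mp : PySem.Dict Int Int),
      (∀ x j, mp.get? x = some j → j < (i : Int)) →
      auxA k rest i mp = false := by
  intro rest
  induction rest with
  | nil => intro i mp _; rfl
  | cons v rest ih =>
    intro i mp hmp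
    have hmp' : ∀ x j, (mp.insert v (i : Int)).get? x = some j → j < ((i + 1 : Nat) : Int) := by
      intro x j hx
      by_cases hxv : x = v
      · subst hxv; rw [PySem.Dict.get?_insert_self] at hx
        simp at hx; push_cast; omega
      · rw [PySem.Dict.get?_insert_of_ne _ _ hxv] at hx
        have := hmp x j hx; push_cast; omega
    simp only [auxA]
    cases hget : mp.get? v with
    | none => exact ih (i + 1) _ hmp'
    | some j =>
      have hj := hmp v j hget
      show (if (i : Int) - j ≤ k then true
            else auxA k rest (i + 1) (mp.insert v (i : Int))) = false
      rw [if_neg (by omega)]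
      exact ih (i + 1) _ hmp'

theorem checkDuplicatesWithinK_eq_alt (arr : List Int) (k : Int) :
    checkDuplicatesWithinK arr k = checkDuplicatesWithinK_alt arr k := by
  unfold checkDuplicatesWithinK checkDuplicatesWithinK_alt
  by_cases hk : k ≤ 0
  · rw [if_pos hk]
    exact auxA_nonpos k hk arr 0 PySem.Dict.empty (by intro x j h; simp [pysem] at h)
  · rw [if_neg hk]
    exact aux_main arr k (by omega) arr 0 PySem.Dict.empty PySem.Set.empty rfl
      (by intro x; simp [pysem, lastIdx]) (by simp [PySem.Set.empty]) (by simp)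

-- ===== VERDICT (by name: the statement is the Claim_ definition above) =====
theorem checkDuplicatesWithinK_spec : Claim_equal_checkDuplicatesWithinK := by
  intro arr k _
  unfold Spec_checkDuplicatesWithinK
  exact checkDuplicatesWithinK_eq_alt arr k
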